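-- pv_equiv track=rewrite | github.com/fnatvig/XSTL | preprocessing.py | get_wnd_goose_num_of_all_events
-- ===== SOURCE A (Python) =====
-- def get_wnd_goose_num_of_all_events(arr, wnd_goose_pkt_num):
--     wnd_goose_pkt_num_of_all_events = []
--     for i in range(len(arr)):
--         sublist = []
--         if i > wnd_goose_pkt_num[i]:
--             for j in range(i, i-wnd_goose_pkt_num[i],-1):
--                 sublist.append(arr[j])
--         else:
--             for j in range(i, -1,-1):
--                 sublist.append(arr[j])
--
--         wnd_goose_pkt_num_of_all_events.append(len(set(sublist)))
--
--     return wnd_goose_pkt_num_of_all_events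
-- ===== SOURCE B (Python) =====
-- def get_wnd_goose_num_of_all_events(arr, wnd_goose_pkt_num):
--     # One pass with a value -> last-occurrence-index dict; the count of distinct
--     # values in the window [left, i] is the number of last occurrences >= left.
--     last = {}
--     out = []
--     for i, v in enumerate(arr):
--         last[v] = i
--         w = wnd_goose_pkt_num[i]
--         left = 0 if w >= i else i + 1 - max(w, 0)
--         out.append(sum(1 for p in last.values() if p >= left))
--     return out
-- ===== Notes on version B (the rewrite author's own statement) =====
-- stated objective: alternative
-- what changed: Instead of materialising each window backwards and deduplicating it with set(), B makes one pass keeping a value->last-occurrence-index dict and counts, per index, the stored last occurrences that fall inside the window (a value is in the window iff its last occurrence is >= the window's left end).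
import Mathlib
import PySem

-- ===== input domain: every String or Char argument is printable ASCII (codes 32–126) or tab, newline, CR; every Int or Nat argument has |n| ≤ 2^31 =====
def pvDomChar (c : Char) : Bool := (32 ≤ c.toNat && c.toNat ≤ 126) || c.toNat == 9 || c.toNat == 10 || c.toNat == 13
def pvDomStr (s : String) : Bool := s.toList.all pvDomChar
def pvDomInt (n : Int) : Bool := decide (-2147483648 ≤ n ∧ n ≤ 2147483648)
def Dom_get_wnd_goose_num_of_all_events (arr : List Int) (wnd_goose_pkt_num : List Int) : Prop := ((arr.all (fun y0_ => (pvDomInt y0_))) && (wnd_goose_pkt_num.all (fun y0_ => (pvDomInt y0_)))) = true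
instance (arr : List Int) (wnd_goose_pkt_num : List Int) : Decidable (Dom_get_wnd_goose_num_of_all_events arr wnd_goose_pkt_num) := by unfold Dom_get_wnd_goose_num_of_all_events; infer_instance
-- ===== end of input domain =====

-- B replaces "materialise each window backwards, then len(set(...))" by one pass with a
-- value -> last-occurrence-index dict, counting per index the last occurrences inside the
-- window (objective: alternative algorithm; return value only, no mutation involved).

-- ===== PORT A =====
-- arr[j] is always in range when the inner loops run, so pyGetD is exact there;
-- wnd_goose_pkt_num[i] is exact under Pre_ (A raises IndexError when wnd is shorter than arr).
def get_wnd_goose_num_of_all_events (arr : List Int) (wnd_goose_pkt_num : List Int) : List Int :=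
  (PySem.List.pyRange 0 (PySem.List.len arr) 1).foldl (fun acc i =>
    let w := PySem.List.pyGetD wnd_goose_pkt_num i 0
    let sublist : List Int :=
      if w < i then
        (PySem.List.pyRange i (i - w) (-1)).foldl (fun s j => s ++ [PySem.List.pyGetD arr j 0]) []
      else
        (PySem.List.pyRange i (-1) (-1)).foldl (fun s j => s ++ [PySem.List.pyGetD arr j 0]) []
    acc ++ [PySem.Set.len (PySem.Set.ofList sublist)]) []

-- ===== PORT B =====
def get_wnd_goose_num_of_all_events_alt (arr : List Int) (wnd_goose_pkt_num : List Int) : List Int :=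
  ((PySem.List.enumerate arr 0).foldl
    (fun (st : PySem.Dict Int Int × List Int) iv =>
      let last := st.1.insert iv.2 iv.1
      let w := PySem.List.pyGetD wnd_goose_pkt_num iv.1 0
      let left : Int := if w ≥ iv.1 then 0 else iv.1 + 1 - max w 0
      (last, st.2 ++ [((last.values.countP (fun p => decide (left ≤ p)) : Int))]))
    (PySem.Dict.empty, [])).2

-- ===== PRECONDITION & SPEC =====
-- Pre_ excludes exactly the inputs where Python A raises IndexError:
-- wnd_goose_pkt_num[i] is read for every i < len(arr).
def Pre_get_wnd_goose_num_of_all_events (arr : List Int) (wnd_goose_pkt_num : List Int) : Prop :=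
  arr.length ≤ wnd_goose_pkt_num.length
instance (arr : List Int) (wnd_goose_pkt_num : List Int) : Decidable (Pre_get_wnd_goose_num_of_all_events arr wnd_goose_pkt_num) := by unfold Pre_get_wnd_goose_num_of_all_events; infer_instance

def pvWitness_get_wnd_goose_num_of_all_events : List Int × List Int := ([4, 7, 4, 2], [2, 0, 5, 2])

def Spec_get_wnd_goose_num_of_all_events (arr : List Int) (wnd_goose_pkt_num : List Int) (out : List Int) : Prop := out = get_wnd_goose_num_of_all_events_alt arr wnd_goose_pkt_num
instance (arr : List Int) (wnd_goose_pkt_num : List Int) (out : List Int) : Decidable (Spec_get_wnd_goose_num_of_all_events arr wnd_goose_pkt_num out) := by unfold Spec_get_wnd_goose_num_of_all_events; infer_instance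

-- ===== CLAIM (what is proved, stated in full; the proofs are below) =====
def Claim_equal_get_wnd_goose_num_of_all_events : Prop := ∀ (arr : List Int) (wnd_goose_pkt_num : List Int), Dom_get_wnd_goose_num_of_all_events arr wnd_goose_pkt_num → Pre_get_wnd_goose_num_of_all_events arr wnd_goose_pkt_num → Spec_get_wnd_goose_num_of_all_events arr wnd_goose_pkt_num (get_wnd_goose_num_of_all_events arr wnd_goose_pkt_num)

-- ===== LEMMAS AND PROOFS =====

def pvDictOf (p : List Int) : PySem.Dict Int Int :=
  (PySem.List.enumerate p 0).foldl (fun d iv => d.insert iv.2 iv.1) PySem.Dict.empty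
def pvLastIdx (p : List Int) (x : Int) : Int :=
  (p.length : Int) - 1 - (p.reverse.idxOf x : Int)
theorem pvDictOf_append (p : List Int) (x : Int) :
    pvDictOf (p ++ [x]) = (pvDictOf p).insert x (p.length : Int) := by
  unfold pvDictOf
  rw [PySem.List.enumerate_append, List.foldl_append]
  simp [PySem.List.enumerate_cons]
theorem pvLastIdx_append_self (p : List Int) (x : Int) :
    pvLastIdx (p ++ [x]) x = (p.length : Int) := by
  simp [pvLastIdx, List.reverse_append]
theorem pvLastIdx_append_ne (p : List Int) (x y : Int) (h : y ≠ x) :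
    pvLastIdx (p ++ [x]) y = pvLastIdx p y := by
  simp [pvLastIdx, List.reverse_append, List.idxOf_cons_ne _ (Ne.symm h)]
  ring

theorem pvItems_dictOf (p : List Int) :
    (pvDictOf p).items = (PySem.Set.ofList p).map (fun y => (y, pvLastIdx p y)) := by
  induction p using List.reverseRecOn with
  | nil => simp [pvDictOf, PySem.Set.ofList_nil]; rfl
  | append_singleton p x ih =>
    rw [pvDictOf_append, PySem.Set.ofList_append_singleton]
    have hkeys : (pvDictOf p).keys = PySem.Set.ofList p := by
      simp [PySem.Dict.keys, ih, Function.comp_def]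
    by_cases hx : x ∈ p
    · have hc : (pvDictOf p).contains x = true := by
        rw [PySem.Dict.contains_iff_mem_keys, hkeys]
        exact (PySem.Set.mem_ofList _ _).2 hx
      rw [PySem.Dict.items_insert_of_contains _ _ hc, ih,
          PySem.Set.add_of_mem ((PySem.Set.mem_ofList _ _).2 hx), List.map_map]
      apply List.map_congr_left
      intro y hy
      by_cases hyx : y = x
      · subst hyx; simp [pvLastIdx_append_self]
      · simp [hyx, pvLastIdx_append_ne _ _ _ hyx]
    · have hc : (pvDictOf p).contains x = false := by
        rw [← Bool.not_eq_true, PySem.Dict.contains_iff_mem_keys, hkeys]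
        simp [PySem.Set.mem_ofList, hx]
      rw [PySem.Dict.items_insert_of_not_contains _ _ hc, ih,
          PySem.Set.add_of_not_mem (by simp [PySem.Set.mem_ofList, hx]), List.map_append]
      congr 1
      · apply List.map_congr_left
        intro y hy
        have hyx : y ≠ x := fun he => hx (he ▸ (PySem.Set.mem_ofList _ _).1 hy)
        simp [pvLastIdx_append_ne _ _ _ hyx]
      · simp [pvLastIdx_append_self]

theorem pvLastIdx_threshold (p : List Int) (x : Int) (l : Nat) :
    x ∈ p.drop l ↔ (l : Int) ≤ pvLastIdx p x := by
  induction p using List.reverseRecOn with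
  | nil => simp [pvLastIdx]; omega
  | append_singleton p a ih =>
    rw [List.drop_append]
    by_cases hax : a = x
    · subst hax
      rw [pvLastIdx_append_self]
      constructor
      · intro hm
        rcases List.mem_append.1 hm with hm | hm
        · have h2 : l < p.length := by
            by_contra hc
            simp [List.drop_eq_nil_of_le (le_of_not_gt hc)] at hm
          omega
        · by_contra hc
          have h3 : p.length < l := by exact_mod_cast lt_of_not_ge hc
          rw [show l - p.length = (l - p.length - 1) + 1 by omega] at hm
          simp at hm
      · intro hl
        apply List.mem_append.2; right
        have hle : l ≤ p.length := by exact_mod_cast hl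
        simp [Nat.sub_eq_zero_of_le hle]
    · rw [pvLastIdx_append_ne _ _ _ (fun he => hax he.symm)]
      rw [← ih]
      constructor
      · intro hm
        rcases List.mem_append.1 hm with hm | hm
        · exact hm
        · exfalso
          have := List.mem_of_mem_drop hm
          simp at this
          exact hax this.symm
      · intro hm; exact List.mem_append.2 (Or.inl hm)

theorem pvSetLen_eq_card (xs : List Int) :
    PySem.Set.len (PySem.Set.ofList xs) = (xs.toFinset.card : Int) := by
  have hnd := PySem.Set.nodup_ofList xs
  have hfs : (PySem.Set.ofList xs).toFinset = xs.toFinset := by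
    ext y; simp [PySem.Set.mem_ofList]
  have : (PySem.Set.ofList xs).length = xs.toFinset.card := by
    rw [← hfs, List.toFinset_card_of_nodup hnd]
  simp [PySem.Set.len, this]

theorem pvCount_eq_card (p : List Int) (vals : List Int) (l : Nat)
    (hv : vals = (PySem.Set.ofList p).map (pvLastIdx p))
    (hthr : ∀ x, x ∈ p.drop l ↔ (l : Int) ≤ pvLastIdx p x) :
    vals.countP (fun v => decide ((l : Int) ≤ v)) = (p.drop l).toFinset.card := by
  subst hv
  rw [List.countP_map]
  have h1 : ((PySem.Set.ofList p).filter (fun y => decide ((l:Int) ≤ pvLastIdx p y))).length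
      = (p.drop l).toFinset.card := by
    have hnd : ((PySem.Set.ofList p).filter (fun y => decide ((l:Int) ≤ pvLastIdx p y))).Nodup :=
      (PySem.Set.nodup_ofList p).filter _
    rw [← List.toFinset_card_of_nodup hnd]
    congr 1
    ext y
    simp only [List.mem_toFinset, List.mem_filter, PySem.Set.mem_ofList, decide_eq_true_eq]
    constructor
    · rintro ⟨_, hle⟩; exact (hthr y).2 hle
    · intro hm; exact ⟨List.mem_of_mem_drop hm, (hthr y).1 hm⟩
  rw [← h1, List.countP_eq_length_filter]
  rfl

theorem pvWindow_map (arr : List Int) (a b : Nat) (hb : b ≤ arr.length) :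
    (PySem.List.pyRange (a : Int) (b : Int) 1).map (fun j => PySem.List.pyGetD arr j 0)
      = (arr.take b).drop a := by
  apply List.ext_getElem
  · simp [PySem.List.length_pyRange_one]
    omega
  · intro k h1 h2
    simp only [List.getElem_map]
    rw [PySem.List.getElem_pyRange_one]
    have hlen : k < ((b:Int) - (a:Int)).toNat := by
      simpa [PySem.List.length_pyRange_one] using h1
    have hk : (a:Int) + (k:Int) < arr.length := by omega
    rw [PySem.List.pyGetD_eq_getElem arr 0 (by omega) hk]
    have hnn : ((a:Int) + (k:Int)).toNat = a + k := by omega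
    rw [List.getElem_drop, List.getElem_take]
    simp only [hnn]

def pvLeft (wnd : List Int) (m : Nat) : Int :=
  let w := PySem.List.pyGetD wnd (m : Int) 0
  if w ≥ (m : Int) then 0 else (m : Int) + 1 - max w 0

def pvValB (wnd p : List Int) (m : Nat) : Int :=
  (((pvDictOf (p.take (m+1))).values.countP (fun v => decide (pvLeft wnd m ≤ v)) : Nat) : Int)

theorem pvFoldB (wnd : List Int) (p : List Int) :
    (PySem.List.enumerate p 0).foldl
      (fun (st : PySem.Dict Int Int × List Int) iv =>
        let last := st.1.insert iv.2 iv.1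
        let w := PySem.List.pyGetD wnd iv.1 0
        let left : Int := if w ≥ iv.1 then 0 else iv.1 + 1 - max w 0
        (last, st.2 ++ [((last.values.countP (fun q => decide (left ≤ q)) : Int))]))
      (PySem.Dict.empty, [])
    = (pvDictOf p, (List.range p.length).map (fun m => pvValB wnd p m)) := by
  induction p using List.reverseRecOn with
  | nil => rfl
  | append_singleton p x ih =>
    rw [PySem.List.enumerate_append, List.foldl_append, ih]
    simp only [PySem.List.enumerate_cons, PySem.List.enumerate_nil, List.foldl_cons, List.foldl_nil,
      zero_add]
    rw [← pvDictOf_append]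
    refine Prod.ext rfl ?_
    simp only [List.length_append, List.length_singleton, List.range_succ, List.map_append, List.map_cons, List.map_nil]
    congr 1
    · apply List.map_congr_left
      intro m hm
      have hm' : m < p.length := List.mem_range.1 hm
      unfold pvValB
      rw [List.take_append_of_le_length (by omega)]
    · unfold pvValB
      rw [List.take_of_length_le (by simp)]
      unfold pvLeft
      simp

theorem pvWindow_map0 (arr : List Int) (b : Nat) (hb : b ≤ arr.length) :
    (PySem.List.pyRange 0 ((b : Nat) : Int) 1).map (fun j => PySem.List.pyGetD arr j 0)
      = arr.take b := by
  have := pvWindow_map arr 0 b hb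
  simpa using this

theorem pvValB_eq_card (arr wnd : List Int) (m : Nat) (L : Nat)
    (hL : pvLeft wnd m = (L : Int)) :
    pvValB wnd arr m = (((arr.take (m+1)).drop L).toFinset.card : Int) := by
  unfold pvValB
  simp only [hL]
  have hv : (pvDictOf (arr.take (m+1))).values
      = (PySem.Set.ofList (arr.take (m+1))).map (pvLastIdx (arr.take (m+1))) := by
    simp only [PySem.Dict.values, pvItems_dictOf, List.map_map, Function.comp_def]
  exact congrArg (Nat.cast : Nat → Int)
    (pvCount_eq_card (arr.take (m+1)) _ L hv (fun x => pvLastIdx_threshold _ x L))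

def pvBodyA (arr wnd : List Int) (i : Int) : Int :=
  PySem.Set.len (PySem.Set.ofList (
    if PySem.List.pyGetD wnd i 0 < i then
      (PySem.List.pyRange i (i - PySem.List.pyGetD wnd i 0) (-1)).foldl (fun s j => s ++ [PySem.List.pyGetD arr j 0]) []
    else
      (PySem.List.pyRange i (-1) (-1)).foldl (fun s j => s ++ [PySem.List.pyGetD arr j 0]) []))

theorem pvPointwise (arr wnd : List Int) (m : Nat) (hm : m < arr.length) :
    pvBodyA arr wnd (m : Int) = pvValB wnd arr m := by
  unfold pvBodyA
  set w := PySem.List.pyGetD wnd (m : Int) 0 with hw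
  by_cases hlt : w < (m : Int)
  · by_cases hw0 : w ≤ 0
    · have hnil : PySem.List.pyRange (m : Int) ((m : Int) - w) (-1) = [] :=
        PySem.List.pyRange_neg_one_eq_nil (by omega)
      rw [if_pos hlt, hnil]
      have hL : pvLeft wnd m = ((m + 1 : Nat) : Int) := by
        unfold pvLeft
        rw [← hw, if_neg (by omega)]
        push_cast
        omega
      rw [pvValB_eq_card arr wnd m (m+1) hL]
      rw [List.drop_eq_nil_of_le (by simp)]
      simp [PySem.Set.len, PySem.Set.ofList]
    · have h0w : (0 : Int) < w := by omega
      set L : Nat := ((m : Int) + 1 - w).toNat with hLdef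
      have hL : pvLeft wnd m = (L : Int) := by
        unfold pvLeft
        rw [← hw, if_neg (by omega)]
        omega
      rw [if_pos hlt, PySem.List.pyRange_neg_one_eq_reverse,
        PySem.List.foldl_append_singleton_eq_map, List.nil_append, List.map_reverse]
      rw [show (m : Int) - w + 1 = (L : Int) by omega,
        show (m : Int) + 1 = ((m + 1 : Nat) : Int) by push_cast; ring]
      rw [pvWindow_map arr L (m+1) (by omega)]
      rw [pvSetLen_eq_card, List.toFinset_reverse, pvValB_eq_card arr wnd m L hL]
  · have hL : pvLeft wnd m = ((0 : Nat) : Int) := by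
      unfold pvLeft
      rw [← hw, if_pos (by omega)]
      rfl
    have hr : PySem.List.pyRange (m : Int) (-1) (-1) = (PySem.List.pyRange 0 ((m : Int) + 1) 1).reverse := by
      rw [PySem.List.pyRange_neg_one_eq_reverse]
      norm_num
    rw [if_neg hlt, hr, PySem.List.foldl_append_singleton_eq_map, List.nil_append, List.map_reverse]
    rw [show (m : Int) + 1 = ((m + 1 : Nat) : Int) by push_cast; ring]
    rw [pvWindow_map0 arr (m+1) (by omega)]
    rw [pvSetLen_eq_card, List.toFinset_reverse, pvValB_eq_card arr wnd m 0 hL]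
    simp

theorem pvMain (arr wnd : List Int) :
    get_wnd_goose_num_of_all_events arr wnd = get_wnd_goose_num_of_all_events_alt arr wnd := by
  have hA : get_wnd_goose_num_of_all_events arr wnd
      = (PySem.List.pyRange 0 (PySem.List.len arr) 1).map (pvBodyA arr wnd) := by
    show (PySem.List.pyRange 0 (PySem.List.len arr) 1).foldl
      (fun acc i => acc ++ [pvBodyA arr wnd i]) [] = _
    rw [PySem.List.foldl_append_singleton_eq_map, List.nil_append]
  have hB : get_wnd_goose_num_of_all_events_alt arr wnd
      = (List.range arr.length).map (fun m => pvValB wnd arr m) := by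
    unfold get_wnd_goose_num_of_all_events_alt
    rw [pvFoldB]
  rw [hA, hB, PySem.List.len_eq, PySem.List.pyRange_zero_nat, List.map_map]
  apply List.map_congr_left
  intro m hm
  exact pvPointwise arr wnd m (List.mem_range.1 hm)

-- ===== VERDICT (by name: the statement is the Claim_ definition above) =====
theorem get_wnd_goose_num_of_all_events_spec : Claim_equal_get_wnd_goose_num_of_all_events := by
  intro arr wnd _hDom _hPre
  unfold Spec_get_wnd_goose_num_of_all_events
  exact pvMain arr wnd
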